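-- pv_equiv track=rewrite | github.com/miliar/Code_Jam_Webscraper | Solutions_python/Problem_155/1111.py | solve
-- ===== SOURCE A (Python) =====
-- def solve(max_shyness, distribution):
--     result = 0
--     n = 0
--     for i in range(max_shyness+1):
--         if (n < i):
--             result += (i - n)
--             n = i
--         n += distribution[i]
--     return result
-- ===== SOURCE B (Python) =====
-- def solve(max_shyness, distribution):
--     # Right-to-left clamped accumulation (Kadane-style): t is the extra-friends
--     # answer for the suffix of positions > i; no prefix sums or counter kept.
--     t = 0
--     for i in range(max_shyness - 1, -1, -1):
--         t = max(0, 1 - distribution[i] + t)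
--     return t
-- ===== Notes on version B (the rewrite author's own statement) =====
-- stated objective: alternative
-- what changed: Replaces A's forward greedy adjusted-counter pass by a right-to-left Kadane-style recurrence t = max(0, 1 - distribution[i] + t) over i = max_shyness-1..0, which never tracks a standing count or prefix sum.
import Mathlib
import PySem

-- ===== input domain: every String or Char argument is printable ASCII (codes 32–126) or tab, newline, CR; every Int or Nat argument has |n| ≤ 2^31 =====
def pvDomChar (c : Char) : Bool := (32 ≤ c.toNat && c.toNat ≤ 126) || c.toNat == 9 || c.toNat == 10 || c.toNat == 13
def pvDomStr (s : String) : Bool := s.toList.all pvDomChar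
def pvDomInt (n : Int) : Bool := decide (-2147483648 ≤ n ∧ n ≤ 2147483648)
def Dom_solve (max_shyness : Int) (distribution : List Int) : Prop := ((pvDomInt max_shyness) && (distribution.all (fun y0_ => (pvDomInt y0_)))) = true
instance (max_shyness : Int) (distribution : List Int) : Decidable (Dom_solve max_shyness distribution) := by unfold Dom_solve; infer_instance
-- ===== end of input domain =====

-- B replaces A's forward greedy counter by a right-to-left clamped suffix recurrence
-- (alternative decomposition, same cost); equivalence is about return values only.

-- ===== PORT A =====
-- step of A's loop body: state (result, n)
def solveStep (distribution : List Int) (p : Int × Int) (i : Int) : Int × Int :=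
  let q := if p.2 < i then (p.1 + (i - p.2), i) else p
  (q.1, q.2 + PySem.List.pyGetD distribution i 0)    -- distribution[i]; total under Pre_ (in range)

def solve (max_shyness : Int) (distribution : List Int) : Int :=
  ((PySem.List.pyRange 0 (max_shyness + 1) 1).foldl (solveStep distribution) (0, 0)).1

-- ===== PORT B =====
-- B's loop body over descending i: t = max(0, 1 - distribution[i] + t)
def solveAltStep (distribution : List Int) (t : Int) (i : Int) : Int :=
  max 0 (1 - PySem.List.pyGetD distribution i 0 + t)    -- distribution[i]; total under Pre_ (in range)

def solve_alt (max_shyness : Int) (distribution : List Int) : Int :=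
  (PySem.List.pyRange (max_shyness - 1) (-1) (-1)).foldl (solveAltStep distribution) 0

-- ===== PRECONDITION & SPEC =====
-- A indexes distribution[i] for i = 0..max_shyness: IndexError unless the list is long enough
def Pre_solve (max_shyness : Int) (distribution : List Int) : Prop :=
  max_shyness < 0 ∨ max_shyness < (distribution.length : Int)
instance (max_shyness : Int) (distribution : List Int) : Decidable (Pre_solve max_shyness distribution) := by unfold Pre_solve; infer_instance
def pvWitness_solve : Int × List Int := (2, [1, 0, 2])

def Spec_solve (max_shyness : Int) (distribution : List Int) (out : Int) : Prop := out = solve_alt max_shyness distribution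
instance (max_shyness : Int) (distribution : List Int) (out : Int) : Decidable (Spec_solve max_shyness distribution out) := by unfold Spec_solve; infer_instance

-- ===== CLAIM (what is proved, stated in full; the proofs are below) =====
def Claim_equal_solve : Prop := ∀ (max_shyness : Int) (distribution : List Int), Dom_solve max_shyness distribution → Pre_solve max_shyness distribution → Spec_solve max_shyness distribution (solve max_shyness distribution)

-- ===== LEMMAS AND PROOFS =====

-- prefix sum of distribution[0..k-1]
def pref (d : List Int) : Nat → Int
  | 0 => 0
  | k+1 => pref d k + PySem.List.pyGetD d (k : Int) 0

-- max over i ∈ [0..k] of (i - pref i)  (the common value of both programs)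
def mx (d : List Int) : Nat → Int
  | 0 => 0
  | k+1 => max (mx d k) (((k : Int) + 1) - pref d (k+1))

theorem solveA_char (d : List Int) :
    ∀ k : Nat, (PySem.List.pyRange 0 ((k : Int) + 1) 1).foldl (solveStep d) (0, 0)
      = (mx d k, mx d k + pref d (k+1)) := by
  intro k
  induction k with
  | zero =>
    rw [show ((0 : Nat) : Int) + 1 = 0 + 1 by omega, PySem.List.pyRange_one_singleton]
    simp [solveStep, mx, pref]
  | succ k ih =>
    have h : PySem.List.pyRange 0 (((k : Int) + 1) + 1) 1
        = PySem.List.pyRange 0 ((k : Int) + 1) 1 ++ [(k : Int) + 1] := by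
      exact PySem.List.pyRange_one_succ_right (show (0 : Int) ≤ (k : Int) + 1 by omega)
    rw [show (((k+1 : Nat) : Int) + 1) = (((k : Int) + 1) + 1) by push_cast; ring, h,
        List.foldl_append, ih]
    simp only [List.foldl_cons, List.foldl_nil, solveStep, mx, pref, Prod.ext_iff]
    split_ifs with hc <;> (push_cast; push_cast at hc; omega)

theorem solveB_char (d : List Int) :
    ∀ k : Nat, ∀ t : Int, (PySem.List.pyRange ((k : Int) + 1 - 1) (-1) (-1)).foldl (solveAltStep d) t
      = max (mx d k) (t + ((k : Int) + 1) - pref d (k+1)) := by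
  intro k
  induction k with
  | zero =>
    intro t
    rw [show ((0 : Nat) : Int) + 1 - 1 = 0 by omega,
        PySem.List.pyRange_neg_one_cons (show (-1 : Int) < 0 by omega),
        PySem.List.pyRange_neg_one_eq_nil (show (0 : Int) - 1 ≤ -1 by omega)]
    simp only [List.foldl_cons, List.foldl_nil, solveAltStep, mx, pref]
    push_cast
    omega
  | succ k ih =>
    intro t
    rw [show (((k+1 : Nat) : Int) + 1 - 1) = ((k : Int) + 1) by push_cast; ring,
        PySem.List.pyRange_neg_one_cons (show (-1 : Int) < (k : Int) + 1 by omega)]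
    simp only [List.foldl_cons]
    rw [ih (solveAltStep d t ((k : Int) + 1))]
    simp only [solveAltStep, mx, pref]
    push_cast
    omega

-- ===== VERDICT (by name: the statements are the Claim_ definitions above) =====
theorem solve_spec : Claim_equal_solve := by
  intro m d _ _
  unfold Spec_solve solve solve_alt
  by_cases hm : 0 ≤ m
  · lift m to Nat using hm with k
    rw [solveA_char d k]
    cases k with
    | zero =>
      rw [show ((0 : Nat) : Int) - 1 = -1 by omega,
          PySem.List.pyRange_neg_one_eq_nil (show (-1 : Int) ≤ -1 by omega)]
      simp [mx]
    | succ k =>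
      rw [show (((k+1 : Nat) : Int) - 1) = ((k : Int) + 1 - 1) by push_cast; ring,
          solveB_char d k 0]
      simp only [mx]
      omega
  · rw [PySem.List.pyRange_one_eq_nil (by omega), PySem.List.pyRange_neg_one_eq_nil (by omega)]
    rfl
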